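-- pv_equiv track=rewrite | github.com/thirunagarimanoj/CFG-Debugger | cyk.py | _tokenize_production
-- ===== SOURCE A (Python) =====
-- def _tokenize_production(prod):
--     if " " in prod.strip():
--         return [token for token in prod.split() if token]
--
--     tokens = []
--     i = 0
--
--     while i < len(prod):
--         ch = prod[i]
--
--         if ch.isspace():
--             i += 1
--             continue
--
--         if ch.isupper():
--             token = ch
--             i += 1
--             while i < len(prod) and (prod[i].isdigit() or prod[i] == "'"):
--                 token += prod[i]
--                 i += 1
--             tokens.append(token)
--             continue
--
--         tokens.append(ch)
--         i += 1
--
--     return tokens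
-- ===== SOURCE B (Python) =====
-- def _tokenize_production(prod):
--     if " " in prod.strip():
--         return prod.split()
--     tokens = []
--     attach = False
--     for ch in prod:
--         if ch.isspace():
--             attach = False
--         elif attach and (ch.isdigit() or ch == "'"):
--             tokens[-1] += ch
--         else:
--             tokens.append(ch)
--             attach = ch.isupper()
--     return tokens
-- ===== Notes on version B (the rewrite author's own statement) =====
-- stated objective: simpler
-- what changed: Replaces A's index-driven two-level while loop (outer scan plus an inner digit/apostrophe-consuming while that grows the token by repeated string concatenation) with a single for-loop over the characters carrying one boolean flag that decides whether a digit/apostrophe extends the last emitted token, and drops the redundant emptiness filter on the split() fast path.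
import Mathlib
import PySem

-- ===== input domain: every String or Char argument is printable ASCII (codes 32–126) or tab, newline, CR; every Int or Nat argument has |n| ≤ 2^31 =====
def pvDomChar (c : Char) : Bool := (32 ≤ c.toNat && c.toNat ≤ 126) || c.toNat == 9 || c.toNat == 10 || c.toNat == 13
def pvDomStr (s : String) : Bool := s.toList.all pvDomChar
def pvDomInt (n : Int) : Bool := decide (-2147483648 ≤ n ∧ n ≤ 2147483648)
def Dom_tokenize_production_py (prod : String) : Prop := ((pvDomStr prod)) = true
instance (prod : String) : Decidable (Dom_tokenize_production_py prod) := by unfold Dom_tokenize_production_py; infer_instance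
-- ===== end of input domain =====

-- B replaces A's index-driven two-level while loop by a single left fold carrying an
-- 'attach' flag (objective: simpler/idiomatic); the space-split fast path drops A's
-- redundant emptiness filter.

-- ===== PORT A =====

-- inner while loop of A: 'while i < len(prod) and (prod[i].isdigit() or prod[i] == "'")'
def pvInnerA : List Char → String → String × List Char
  | [], tok => (tok, [])
  | c :: rest, tok =>
    if PySem.Chars.isdigit c || c == '\'' then pvInnerA rest (tok.push c)
    else (tok, c :: rest)

-- termination fact the outer loop's recursion cites
theorem pvInnerA_len : ∀ (cs : List Char) (tok : String),
    (pvInnerA cs tok).2.length ≤ cs.length := by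
  intro cs
  induction cs with
  | nil => intro tok; simp [pvInnerA]
  | cons c rest ih =>
    intro tok
    simp only [pvInnerA]
    split
    · exact le_trans (ih _) (Nat.le_succ _)
    · simp

-- outer while loop of A, one recursive call per executed iteration of the scan
def pvScanA : List Char → List String
  | [] => []
  | c :: rest =>
    if PySem.Chars.isspace c then pvScanA rest
    else if PySem.Chars.isupper c then
      (pvInnerA rest (String.singleton c)).1 ::
        pvScanA (pvInnerA rest (String.singleton c)).2
    else String.singleton c :: pvScanA rest
termination_by cs => cs.length
decreasing_by
  · simp
  · exact Nat.lt_succ_of_le (pvInnerA_len rest (String.singleton c))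
  · simp

def tokenize_production_py (prod : String) : List String :=
  if PySem.Str.isIn " " (PySem.Str.strip prod) then
    (PySem.Str.split₀ prod).filter (fun token => !(token == ""))
  else pvScanA prod.toList

-- ===== PORT B =====

-- 'tokens[-1] += ch'
def pvAppendLast : List String → Char → List String
  | [], c => [String.singleton c]
  | [t], c => [t.push c]
  | t :: u :: rest, c => t :: pvAppendLast (u :: rest) c

-- one step of B's for-loop: state = (tokens, attach)
def pvStepB (st : List String × Bool) (c : Char) : List String × Bool :=
  if PySem.Chars.isspace c then (st.1, false)
  else if st.2 && (PySem.Chars.isdigit c || c == '\'') then (pvAppendLast st.1 c, st.2)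
  else (st.1 ++ [String.singleton c], PySem.Chars.isupper c)

def tokenize_production_py_alt (prod : String) : List String :=
  if PySem.Str.isIn " " (PySem.Str.strip prod) then PySem.Str.split₀ prod
  else (prod.toList.foldl pvStepB ([], false)).1

-- ===== PRECONDITION & SPEC =====
def Spec_tokenize_production_py (prod : String) (out : List String) : Prop := out = tokenize_production_py_alt prod
instance (prod : String) (out : List String) : Decidable (Spec_tokenize_production_py prod out) := by unfold Spec_tokenize_production_py; infer_instance

-- ===== CLAIM (what is proved, stated in full; the proofs are below) =====
def Claim_equal_tokenize_production_py : Prop := ∀ (prod : String), Dom_tokenize_production_py prod → Spec_tokenize_production_py prod (tokenize_production_py prod)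

-- ===== LEMMAS AND PROOFS =====

-- split() never yields an empty word, so A's filter is the identity
theorem pv_rev_ne (cur : List Char) (h : cur.isEmpty = false) : cur.reverse ≠ [] := by
  simp only [List.isEmpty_eq_false_iff] at h
  simpa using h

theorem pv_go_ne : ∀ (cs cur : List Char) (acc : List (List Char)),
    (∀ t ∈ acc, t ≠ []) → ∀ t ∈ PySem.Chars.split₀.go cs cur acc, t ≠ [] := by
  intro cs
  induction cs with
  | nil =>
    intro cur acc hacc t ht
    simp only [PySem.Chars.split₀.go] at ht
    by_cases hc : cur.isEmpty = true
    · rw [if_pos hc] at ht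
      exact hacc t (by simpa using ht)
    · rw [if_neg hc] at ht
      simp only [List.reverse_cons] at ht
      rcases (by simpa using ht : t ∈ acc ∨ t = cur.reverse) with h | h
      · exact hacc t h
      · subst h; exact pv_rev_ne cur (Bool.eq_false_iff.mpr hc)
  | cons c rest ih =>
    intro cur acc hacc t ht
    simp only [PySem.Chars.split₀.go] at ht
    by_cases hs : PySem.Chars.isspace c = true
    · rw [if_pos hs] at ht
      by_cases hc : cur.isEmpty = true
      · rw [if_pos hc] at ht
        exact ih [] acc hacc t ht
      · rw [if_neg hc] at ht
        refine ih [] (cur.reverse :: acc) ?_ t ht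
        intro u hu
        rcases hu with _ | hu
        · exact pv_rev_ne cur (Bool.eq_false_iff.mpr hc)
        · exact hacc u (by assumption)
    · rw [if_neg hs] at ht
      exact ih (c :: cur) acc hacc t ht

theorem pv_split₀_ne_nil (cs : List Char) : ∀ t ∈ PySem.Chars.split₀ cs, t ≠ [] :=
  pv_go_ne cs [] [] (by simp)

theorem pv_filter_split₀ (s : String) :
    (PySem.Str.split₀ s).filter (fun token => !(token == "")) = PySem.Str.split₀ s := by
  apply List.filter_eq_self.mpr
  intro a ha
  simp only [PySem.Str.split₀, List.mem_map] at ha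
  obtain ⟨t, ht, rfl⟩ := ha
  have hne := pv_split₀_ne_nil s.toList t ht
  simp only [Bool.not_eq_eq_eq_not, Bool.not_true, beq_eq_false_iff_ne]
  intro h
  exact hne (by simpa using congrArg String.toList h)

theorem pv_appendLast_append (out : List String) (t : String) (c : Char) :
    pvAppendLast (out ++ [t]) c = out ++ [t.push c] := by
  induction out with
  | nil => simp [pvAppendLast]
  | cons x xs ih =>
    cases xs with
    | nil => simp [pvAppendLast]
    | cons y ys => simpa [pvAppendLast] using ih

-- B from an attach=true state consumes exactly A's inner digit/apostrophe run
theorem pv_digit_not_space (c : Char) (h : PySem.Chars.isdigit c = true) :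
    PySem.Chars.isspace c = false := by
  have h0 : ('0').val.toNat = 48 := rfl
  have h9 : ('9').val.toNat = 57 := rfl
  simp only [PySem.Chars.isdigit, PySem.Chars.isspace, Bool.and_eq_true, decide_eq_true_eq,
    Char.le_def, UInt32.le_iff_toNat_le, Char.toNat, h0, h9, Bool.or_eq_false_iff,
    Bool.and_eq_false_iff, decide_eq_false_iff_not] at h ⊢
  omega

theorem pv_L2 : ∀ (cs : List Char) (out : List String) (t : String),
    (cs.foldl pvStepB (out ++ [t], true)).1 =
      (((pvInnerA cs t).2).foldl pvStepB (out ++ [(pvInnerA cs t).1], false)).1 := by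
  intro cs
  induction cs with
  | nil => intro out t; simp [pvInnerA]
  | cons c rest ih =>
    intro out t
    by_cases hd : (PySem.Chars.isdigit c || c == '\'') = true
    · have hsp : PySem.Chars.isspace c = false := by
        rcases Bool.or_eq_true _ _ |>.mp hd with h | h
        · exact pv_digit_not_space c h
        · have hc : c = '\'' := by simpa using h
          subst hc; decide
      simp only [pvInnerA, hd, if_true, List.foldl_cons, pvStepB, hsp, Bool.false_eq_true,
        if_false, Bool.true_and, if_true, pv_appendLast_append]
      exact ih out (t.push c)
    · by_cases hsp : PySem.Chars.isspace c = true
      · simp [pvInnerA, hd, pvStepB, hsp]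
      · simp [pvInnerA, hd, pvStepB, hsp]

-- B from an attach=false state produces exactly A's scan, appended to the tokens so far
theorem pv_L1 : ∀ (n : Nat) (cs : List Char), cs.length ≤ n → ∀ (out : List String),
    (cs.foldl pvStepB (out, false) ).1 = out ++ pvScanA cs := by
  intro n
  induction n with
  | zero =>
    intro cs hcs out
    have : cs = [] := List.eq_nil_of_length_eq_zero (Nat.le_zero.mp hcs)
    subst this; simp [pvScanA]
  | succ n ih =>
    intro cs hcs out
    cases cs with
    | nil => simp [pvScanA]
    | cons c rest =>
      have hrest : rest.length ≤ n := by simpa using hcs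
      rw [pvScanA, List.foldl_cons]
      by_cases hsp : PySem.Chars.isspace c = true
      · have hstep : pvStepB (out, false) c = (out, false) := by simp [pvStepB, hsp]
        rw [hstep, if_pos hsp]
        exact ih rest hrest out
      · have hstep : pvStepB (out, false) c =
            (out ++ [String.singleton c], PySem.Chars.isupper c) := by
          simp [pvStepB, hsp]
        rw [hstep, if_neg hsp]
        by_cases hup : PySem.Chars.isupper c = true
        · rw [hup, pv_L2 rest out (String.singleton c),
            ih (pvInnerA rest (String.singleton c)).2
              (le_trans (pvInnerA_len rest (String.singleton c)) hrest)]
          simp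
        · rw [Bool.eq_false_iff.mpr hup,
            ih rest hrest (out ++ [String.singleton c])]
          simp

-- ===== VERDICT (by name: the statement is the Claim_ definition above) =====
theorem tokenize_production_py_spec : Claim_equal_tokenize_production_py := by
  intro prod _
  unfold Spec_tokenize_production_py tokenize_production_py tokenize_production_py_alt
  by_cases h : PySem.Str.isIn " " (PySem.Str.strip prod) = true
  · rw [if_pos h, if_pos h, pv_filter_split₀]
  · rw [if_neg h, if_neg h]
    exact (pv_L1 prod.toList.length prod.toList le_rfl []).symm ▸ rfl
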